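-- pv_equiv track=rewrite | github.com/kkobanenko/Clin-rec | app/ui/preview_utils.py | render_html_preview
-- ===== SOURCE A (Python) =====
-- def render_html_preview(html_content: str, max_length: int = 50000) -> str:
--     """Render HTML preview with safety checks.
--
--     Args:
--         html_content: Raw HTML bytes
--         max_length: Max characters to display (prevent huge files)
--
--     Returns:
--         Safe HTML string for display
--     """
--     if not html_content:
--         return "<p>Empty HTML document</p>"
--
--     if len(html_content) > max_length:
--         return f"<p>HTML preview truncated ({len(html_content)} bytes, showing first {max_length}):</p><pre>{html_content[:max_length]}...</pre>"
--
--     # Basic XSS prevention: strip dangerous tags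
--     dangerous_tags = ['<script', '<iframe', '<object', '<embed', 'javascript:', 'onerror=']
--     safe_html = html_content
--
--     for tag in dangerous_tags:
--         safe_html = safe_html.replace(tag, f"&lt;{tag[1:]}")
--
--     return safe_html
-- ===== SOURCE B (Python) =====
-- def render_html_preview(html_content: str, max_length: int = 50000) -> str:
--     """Render HTML preview with safety checks (single-pass scan)."""
--     if not html_content:
--         return "<p>Empty HTML document</p>"
--
--     if len(html_content) > max_length:
--         return f"<p>HTML preview truncated ({len(html_content)} bytes, showing first {max_length}):</p><pre>{html_content[:max_length]}...</pre>"
--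
--     dangerous_tags = ['<script', '<iframe', '<object', '<embed', 'javascript:', 'onerror=']
--     out = []
--     i = 0
--     n = len(html_content)
--     while i < n:
--         for tag in dangerous_tags:
--             if html_content.startswith(tag, i):
--                 out.append("&lt;" + tag[1:])
--                 i += len(tag)
--                 break
--         else:
--             out.append(html_content[i])
--             i += 1
--     return "".join(out)
-- ===== Notes on version B (the rewrite author's own statement) =====
-- stated objective: alternative
-- what changed: The six sequential full-string .replace passes are replaced by a single left-to-right scan that, at each position, checks the dangerous-tag table once and emits either the escaped tag or the character, building the output in one pass.
import Mathlib
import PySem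

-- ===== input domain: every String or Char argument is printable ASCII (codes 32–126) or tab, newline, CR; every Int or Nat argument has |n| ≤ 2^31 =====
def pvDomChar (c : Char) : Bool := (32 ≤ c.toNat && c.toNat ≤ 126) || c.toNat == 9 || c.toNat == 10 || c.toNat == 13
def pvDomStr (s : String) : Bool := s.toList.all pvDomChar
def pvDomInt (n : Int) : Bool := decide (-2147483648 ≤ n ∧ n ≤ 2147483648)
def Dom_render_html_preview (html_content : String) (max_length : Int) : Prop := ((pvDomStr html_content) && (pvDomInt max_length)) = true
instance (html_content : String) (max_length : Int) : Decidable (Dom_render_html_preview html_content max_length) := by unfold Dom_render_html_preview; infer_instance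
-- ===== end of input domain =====

-- B replaces A's six sequential full-string .replace passes by one left-to-right scan that at each
-- position consults the dangerous-tag table once (objective: alternative single-pass algorithm, same output).

-- ===== PORT A =====
def pvTagsA : List String := ["<script", "<iframe", "<object", "<embed", "javascript:", "onerror="]

def render_html_preview (html_content : String) (max_length : Int) : String :=
  if html_content = "" then "<p>Empty HTML document</p>"
  else if PySem.Str.len html_content > max_length then
    "<p>HTML preview truncated (" ++ PySem.Int.toStr (PySem.Str.len html_content) ++
      " bytes, showing first " ++ PySem.Int.toStr max_length ++ "):</p><pre>" ++
      PySem.Str.slice html_content none (some max_length) ++ "...</pre>"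
  else
    pvTagsA.foldl (fun safe tag => PySem.Str.replace safe tag ("&lt;" ++ PySem.Str.slice tag (some 1) none)) html_content

-- ===== PORT B =====
def pvTagsB : List (List Char) :=
  ["<script".toList, "<iframe".toList, "<object".toList, "<embed".toList, "javascript:".toList, "onerror=".toList]

-- "&lt;" + tag[1:]
def pvRepl (tag : List Char) : List Char := '&' :: 'l' :: 't' :: ';' :: tag.drop 1

-- the single left-to-right scan of Source B: first matching tag wins, else copy one character
def pvScan (tags : List (List Char)) (l : List Char) : List Char :=
  match l with
  | [] => []
  | c :: t =>
    match tags.find? (fun tg => tg.isPrefixOf (c :: t)) with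
    | some tg => pvRepl tg ++ pvScan tags (List.drop (tg.length - 1) t)
    | none => c :: pvScan tags t
termination_by l.length
decreasing_by
  all_goals simp

def render_html_preview_alt (html_content : String) (max_length : Int) : String :=
  if html_content = "" then "<p>Empty HTML document</p>"
  else if PySem.Str.len html_content > max_length then
    "<p>HTML preview truncated (" ++ PySem.Int.toStr (PySem.Str.len html_content) ++
      " bytes, showing first " ++ PySem.Int.toStr max_length ++ "):</p><pre>" ++
      PySem.Str.slice html_content none (some max_length) ++ "...</pre>"
  else
    String.ofList (pvScan pvTagsB html_content.toList)

-- ===== PRECONDITION & SPEC =====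
def Spec_render_html_preview (html_content : String) (max_length : Int) (out : String) : Prop := out = render_html_preview_alt html_content max_length
instance (html_content : String) (max_length : Int) (out : String) : Decidable (Spec_render_html_preview html_content max_length out) := by unfold Spec_render_html_preview; infer_instance

-- ===== CLAIM (what is proved, stated in full; the proofs are below) =====
def Claim_equal_render_html_preview : Prop := ∀ (html_content : String) (max_length : Int), Dom_render_html_preview html_content max_length → Spec_render_html_preview html_content max_length (render_html_preview html_content max_length)

-- ===== LEMMAS AND PROOFS =====

-- clean recursive form of Python's str.replace (nonempty pattern), used to analyse A's chain
def pvRep (old rep : List Char) (l : List Char) : List Char :=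
  match l with
  | [] => []
  | c :: t => if old.isPrefixOf (c :: t) then rep ++ pvRep old rep (List.drop (old.length - 1) t)
              else c :: pvRep old rep t
termination_by l.length
decreasing_by
  all_goals simp

lemma pvRep_nil (old rep : List Char) : pvRep old rep [] = [] := by
  unfold pvRep; rfl

lemma pvRep_cons (old rep : List Char) (c : Char) (t : List Char) :
    pvRep old rep (c :: t) =
      if old.isPrefixOf (c :: t) then rep ++ pvRep old rep (List.drop (old.length - 1) t)
      else c :: pvRep old rep t := by
  conv_lhs => unfold pvRep

lemma pvScan_nil (tags : List (List Char)) : pvScan tags [] = [] := by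
  unfold pvScan; rfl

lemma pvScan_cons (tags : List (List Char)) (c : Char) (t : List Char) :
    pvScan tags (c :: t) =
      match tags.find? (fun tg => tg.isPrefixOf (c :: t)) with
      | some tg => pvRepl tg ++ pvScan tags (List.drop (tg.length - 1) t)
      | none => c :: pvScan tags t := by
  conv_lhs => unfold pvScan

lemma pvGoEq (old new : List Char) (hold : old ≠ []) :
    ∀ (fuel : Nat) (l acc : List Char), l.length ≤ fuel →
      PySem.Chars.replace.go old new fuel l acc = acc.reverse ++ pvRep old new l := by
  intro fuel
  induction fuel with
  | zero =>
    intro l acc h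
    have : l = [] := List.eq_nil_of_length_eq_zero (Nat.le_zero.mp h)
    subst this
    rw [PySem.Chars.replace.go.eq_def]
    simp [pvRep_nil]
  | succ f ih =>
    intro l acc h
    cases l with
    | nil =>
      rw [PySem.Chars.replace.go.eq_def]
      simp [pvRep_nil]
    | cons c t =>
      rw [PySem.Chars.replace.go.eq_def]
      obtain ⟨m, hm⟩ : ∃ m, old.length = m + 1 := by
        cases old with
        | nil => exact absurd rfl hold
        | cons a b => exact ⟨b.length, rfl⟩
      by_cases hp : old.isPrefixOf (c :: t) = true
      · simp only [hp, if_true]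
        rw [ih (List.drop old.length (c :: t)) (new.reverse ++ acc)
              (by simp only [List.length_drop, List.length_cons]
                  simp only [List.length_cons] at h
                  omega)]
        rw [pvRep_cons]
        simp only [hp, if_true]
        have hd : List.drop old.length (c :: t) = List.drop (old.length - 1) t := by
          rw [hm]; simp only [List.drop_succ_cons, Nat.add_sub_cancel]
        rw [hd]
        simp [List.reverse_append]
      · have hp' : old.isPrefixOf (c :: t) = false := by
          cases hb : old.isPrefixOf (c :: t) with
          | false => rfl
          | true => exact absurd hb hp
        simp only [hp', Bool.false_eq_true, if_false]
        rw [ih t (c :: acc) (by simpa using Nat.succ_le_succ_iff.mp h)]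
        rw [pvRep_cons]
        simp [hp']

lemma pvReplaceEq (s old new : List Char) (h : old ≠ []) :
    PySem.Chars.replace s old new = pvRep old new s := by
  unfold PySem.Chars.replace
  rw [if_neg (by simpa [List.isEmpty_iff] using h)]
  simpa using pvGoEq old new h s.length s [] le_rfl

-- replace skips over a block in which its pattern matches at no position
lemma pvRepAppend (old rep : List Char) :
    ∀ (b X : List Char), (∀ p, p < b.length → ¬ old <+: List.drop p (b ++ X)) →
      pvRep old rep (b ++ X) = b ++ pvRep old rep X := by
  intro b
  induction b with
  | nil => intro X _; simp
  | cons c b' ih =>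
    intro X h
    have h0 : ¬ old.isPrefixOf (c :: (b' ++ X)) = true := by
      intro hc
      exact h 0 (by simp) (by simpa [List.isPrefixOf_iff_prefix] using hc)
    rw [show (c :: b') ++ X = c :: (b' ++ X) from rfl, pvRep_cons]
    simp only [if_neg h0]
    rw [ih X (fun p hp hc => h (p + 1) (by simpa using Nat.succ_lt_succ hp) (by simpa using hc))]
    rfl

-- the scan skips over a block in which no tag matches at any position
lemma pvScanAppend (T : List (List Char)) :
    ∀ (b X : List Char), (∀ p, p < b.length → ∀ tg ∈ T, ¬ tg <+: List.drop p (b ++ X)) →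
      pvScan T (b ++ X) = b ++ pvScan T X := by
  intro b
  induction b with
  | nil => intro X _; simp
  | cons c b' ih =>
    intro X h
    have hfind : T.find? (fun tg => tg.isPrefixOf (c :: (b' ++ X))) = none := by
      rw [List.find?_eq_none]
      intro tg htg
      simp only [List.isPrefixOf_iff_prefix]
      exact h 0 (by simp) tg htg
    rw [show (c :: b') ++ X = c :: (b' ++ X) from rfl, pvScan_cons]
    simp only [hfind]
    rw [ih X (fun p hp tg htg hc => h (p + 1) (by simpa using Nat.succ_lt_succ hp) tg htg (by simpa using hc))]
    rfl

lemma pvScanNil : ∀ s : List Char, pvScan [] s = s := by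
  intro s
  induction s with
  | nil => rw [pvScan_nil]
  | cons c t ih => rw [pvScan_cons]; simp [ih]

-- a prefix of the scan output containing no '&' is a prefix of the input
lemma pvNoAmpPrefix (T : List (List Char)) :
    ∀ (s u : List Char), (∀ a ∈ u, a ≠ '&') → u <+: pvScan T s → u <+: s := by
  intro s
  induction s with
  | nil => intro u _ h; rw [pvScan_nil] at h; exact h
  | cons c t ih =>
    intro u hamp h
    rw [pvScan_cons] at h
    cases hfind : T.find? (fun tg => tg.isPrefixOf (c :: t)) with
    | some tg =>
      rw [hfind] at h
      cases u with
      | nil => exact List.nil_prefix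
      | cons a u' =>
        obtain ⟨v, hv⟩ := h
        simp only [pvRepl, List.cons_append] at hv
        injection hv with h1 _
        exact absurd h1 (hamp a (by simp))
    | none =>
      rw [hfind] at h
      cases u with
      | nil => exact List.nil_prefix
      | cons a u' =>
        obtain ⟨v, hv⟩ := h
        simp only [List.cons_append] at hv
        injection hv with h1 h2
        subst h1
        exact (List.cons_prefix_cons).mpr ⟨rfl, ih u' (fun x hx => hamp x (by simp [hx])) ⟨v, h2⟩⟩

-- main step: applying one more replace pass to the scan over tag set T gives the scan over T ++ [j]
theorem pvStep (T : List (List Char)) (j : List Char) (hj : j ≠ [])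
    (hamp : j.all (fun a => a != '&') = true)
    (h1 : ∀ tg ∈ T, ∀ p, p < (pvRepl tg).length → ¬ j <+: (pvRepl tg).drop p ∧ ¬ (pvRepl tg).drop p <+: j)
    (h2 : ∀ tg ∈ T, ∀ p, p < j.length → 0 < p → ¬ tg <+: j.drop p ∧ ¬ j.drop p <+: tg) :
    ∀ s, pvRep j (pvRepl j) (pvScan T s) = pvScan (T ++ [j]) s := by
  have hampP : ∀ a ∈ j, a ≠ '&' := by
    intro a ha
    simpa using List.all_eq_true.mp hamp a ha
  have main : ∀ n (s : List Char), s.length ≤ n →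
      pvRep j (pvRepl j) (pvScan T s) = pvScan (T ++ [j]) s := by
    intro n
    induction n with
    | zero =>
      intro s hs
      have : s = [] := List.eq_nil_of_length_eq_zero (Nat.le_zero.mp hs)
      subst this
      rw [pvScan_nil, pvScan_nil, pvRep_nil]
    | succ n ih =>
      intro s hs
      cases s with
      | nil => rw [pvScan_nil, pvScan_nil, pvRep_nil]
      | cons c t =>
        cases hfind : T.find? (fun tg => tg.isPrefixOf (c :: t)) with
        | some tg =>
          have htgT : tg ∈ T := List.mem_of_find?_eq_some hfind
          have hfind' : (T ++ [j]).find? (fun tg => tg.isPrefixOf (c :: t)) = some tg := by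
            rw [List.find?_append, hfind]; rfl
          rw [pvScan_cons]; simp only [hfind]
          conv_rhs => rw [pvScan_cons]
          simp only [hfind']
          rw [pvRepAppend j (pvRepl j) (pvRepl tg) _ ?_]
          · rw [ih (List.drop (tg.length - 1) t)
              (by simp only [List.length_drop]
                  simp only [List.length_cons] at hs
                  omega)]
          · intro p hp hc
            rw [List.drop_append_of_le_length (Nat.le_of_lt hp)] at hc
            rcases List.prefix_or_prefix_of_prefix hc (List.prefix_append _ _) with hx | hx
            · exact (h1 tg htgT p hp).1 hx
            · exact (h1 tg htgT p hp).2 hx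
        | none =>
          have hnone : ∀ tg ∈ T, ¬ tg <+: (c :: t) := by
            intro tg htg
            have := List.find?_eq_none.mp hfind tg htg
            simpa [List.isPrefixOf_iff_prefix] using this
          by_cases hjp : j <+: (c :: t)
          · -- j matches at the head
            obtain ⟨rest, hrest⟩ := hjp
            obtain ⟨j', rfl⟩ : ∃ j', j = c :: j' := by
              cases j with
              | nil => exact absurd rfl hj
              | cons a j' =>
                rw [List.cons_append, List.cons_eq_cons] at hrest
                exact ⟨j', by rw [hrest.1]⟩
            have htdef : j' ++ rest = t := by
              rw [List.cons_append, List.cons_eq_cons] at hrest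
              exact hrest.2
            subst htdef
            have hscan : pvScan T (c :: (j' ++ rest)) = (c :: j') ++ pvScan T rest := by
              rw [show c :: (j' ++ rest) = (c :: j') ++ rest from rfl]
              rw [pvScanAppend T (c :: j') rest ?_]
              intro p hp tg htg hc
              rcases Nat.eq_zero_or_pos p with h0 | h0
              · subst h0
                simp only [List.drop_zero] at hc
                exact hnone tg htg (by simpa using hc)
              · rw [List.drop_append_of_le_length (Nat.le_of_lt hp)] at hc
                rcases List.prefix_or_prefix_of_prefix hc (List.prefix_append _ _) with hx | hx
                · exact (h2 tg htg p hp h0).1 hx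
                · exact (h2 tg htg p hp h0).2 hx
            rw [hscan]
            rw [show (c :: j') ++ pvScan T rest = c :: (j' ++ pvScan T rest) from rfl, pvRep_cons]
            have hpref : (c :: j').isPrefixOf (c :: (j' ++ pvScan T rest)) = true := by
              rw [List.isPrefixOf_iff_prefix]
              exact ⟨pvScan T rest, by simp⟩
            simp only [hpref, if_true]
            have hdrop : List.drop ((c :: j').length - 1) (j' ++ pvScan T rest) = pvScan T rest := by
              simp
            rw [hdrop]
            have hrle : rest.length ≤ n := by
              simp only [List.length_cons, List.length_append] at hs
              omega
            rw [ih rest hrle]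
            -- right-hand side
            have hfj : ((T ++ [c :: j']).find? (fun tg => tg.isPrefixOf (c :: (j' ++ rest)))) = some (c :: j') := by
              have hpref2 : (c :: j').isPrefixOf (c :: (j' ++ rest)) = true := by
                rw [List.isPrefixOf_iff_prefix]
                exact ⟨rest, rfl⟩
              rw [List.find?_append, hfind]
              simp [List.find?, hpref2]
            conv_rhs => rw [pvScan_cons]
            simp only [hfj]
            have : List.drop ((c :: j').length - 1) (j' ++ rest) = rest := by simp
            rw [this]
          · -- no tag at all matches at the head
            have hjf : j.isPrefixOf (c :: t) = false := by
              cases hb : j.isPrefixOf (c :: t) with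
              | false => rfl
              | true => exact absurd (List.isPrefixOf_iff_prefix.mp hb) hjp
            have hfind2 : (T ++ [j]).find? (fun tg => tg.isPrefixOf (c :: t)) = none := by
              rw [List.find?_append, hfind]
              simp [List.find?, hjf]
            rw [pvScan_cons]; simp only [hfind]
            conv_rhs => rw [pvScan_cons]
            simp only [hfind2]
            have hnp : ¬ j.isPrefixOf (c :: pvScan T t) = true := by
              intro hc
              rw [List.isPrefixOf_iff_prefix] at hc
              have hc' : j <+: pvScan T (c :: t) := by
                rw [pvScan_cons]; simp only [hfind]; exact hc
              exact hjp (pvNoAmpPrefix T (c :: t) j hampP hc')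
            rw [pvRep_cons]
            simp only [if_neg hnp]
            rw [ih t (by simpa using Nat.succ_le_succ_iff.mp hs)]
  intro s
  exact main s.length s le_rfl

-- chaining the six replace passes
set_option maxRecDepth 4000 in
theorem pvChain (s : List Char) :
    pvRep "onerror=".toList (pvRepl "onerror=".toList)
      (pvRep "javascript:".toList (pvRepl "javascript:".toList)
        (pvRep "<embed".toList (pvRepl "<embed".toList)
          (pvRep "<object".toList (pvRepl "<object".toList)
            (pvRep "<iframe".toList (pvRepl "<iframe".toList)
              (pvRep "<script".toList (pvRepl "<script".toList) s))))) = pvScan pvTagsB s := by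
  have e1 := pvStep [] "<script".toList (by decide) (by decide) (by decide) (by decide)
  have e2 := pvStep ["<script".toList] "<iframe".toList (by decide) (by decide) (by decide) (by decide)
  have e3 := pvStep ["<script".toList, "<iframe".toList] "<object".toList (by decide) (by decide) (by decide) (by decide)
  have e4 := pvStep ["<script".toList, "<iframe".toList, "<object".toList] "<embed".toList (by decide) (by decide) (by decide) (by decide)
  have e5 := pvStep ["<script".toList, "<iframe".toList, "<object".toList, "<embed".toList] "javascript:".toList (by decide) (by decide) (by decide) (by decide)
  have e6 := pvStep ["<script".toList, "<iframe".toList, "<object".toList, "<embed".toList, "javascript:".toList] "onerror=".toList (by decide) (by decide) (by decide) (by decide)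
  have f1 : pvRep "<script".toList (pvRepl "<script".toList) s = pvScan ["<script".toList] s := by
    have := e1 s
    rwa [pvScanNil] at this
  rw [f1, e2 s]
  simp only [List.cons_append, List.nil_append]
  rw [e3 s]
  simp only [List.cons_append, List.nil_append]
  rw [e4 s]
  simp only [List.cons_append, List.nil_append]
  rw [e5 s]
  simp only [List.cons_append, List.nil_append]
  rw [e6 s]
  simp only [List.cons_append, List.nil_append]
  rfl

-- ===== VERDICT (by name: the statement is the Claim_ definition above) =====
set_option maxRecDepth 4000 in
theorem render_html_preview_spec : Claim_equal_render_html_preview := by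
  intro html_content max_length _
  unfold Spec_render_html_preview render_html_preview render_html_preview_alt
  split_ifs with h1 h2
  · rfl
  · rfl
  · rw [← String.toList_inj]
    simp only [pvTagsA, List.foldl_cons, List.foldl_nil]
    simp only [PySem.Str.toList_replace]
    rw [pvReplaceEq _ _ _ (by decide), pvReplaceEq _ _ _ (by decide), pvReplaceEq _ _ _ (by decide),
        pvReplaceEq _ _ _ (by decide), pvReplaceEq _ _ _ (by decide), pvReplaceEq _ _ _ (by decide)]
    rw [show ("&lt;" ++ PySem.Str.slice "<script" (some 1) none).toList = pvRepl "<script".toList from by decide,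
        show ("&lt;" ++ PySem.Str.slice "<iframe" (some 1) none).toList = pvRepl "<iframe".toList from by decide,
        show ("&lt;" ++ PySem.Str.slice "<object" (some 1) none).toList = pvRepl "<object".toList from by decide,
        show ("&lt;" ++ PySem.Str.slice "<embed" (some 1) none).toList = pvRepl "<embed".toList from by decide,
        show ("&lt;" ++ PySem.Str.slice "javascript:" (some 1) none).toList = pvRepl "javascript:".toList from by decide,
        show ("&lt;" ++ PySem.Str.slice "onerror=" (some 1) none).toList = pvRepl "onerror=".toList from by decide]
    rw [String.toList_ofList]
    simpa using pvChain html_content.toList
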